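-- pv_equiv track=rewrite | github.com/mechauk418/BOJ | 프로그래머스/unrated/172927. 광물 캐기/광물 캐기.py | solution
-- ===== SOURCE A (Python) =====
-- def list_div(lst,n):
--     return [lst[i:i+n] for i in range(0,len(lst),n)]
--
-- def solution(picks, minerals):
--     answer = 0
--     sum_gok = sum(picks)
--
--     if len(minerals) > sum_gok * 5:
--         minerals = minerals[:sum_gok*5]
--
--     min_5 = list_div(minerals,5)
--     mine_list = []
--     for i in min_5:
--         sum_ = 0
--         for j in i:
--             if j=='stone':
--                 sum_ += 1
--             elif j=='iron':
--                 sum_ += 5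
--             else:
--                 sum_ +=25
--
--         mine_list.append([i,sum_])
--
--     mine_list.sort(key=lambda x:(-x[1]))
--
--     dia,ir,st = picks
--
--     while dia > 0:
--         if mine_list:
--             elem = mine_list.pop(0)
--             for i in elem[0]:
--                 answer +=1
--         dia -=1
--
--     while ir > 0:
--         if mine_list:
--             elem = mine_list.pop(0)
--             for i in elem[0]:
--                 if i == 'diamond':
--                     answer += 5
--                 else:
--                     answer +=1
--
--         ir -= 1
--
--     while st > 0:
--         if mine_list:
--             elem = mine_list.pop(0)
--             for i in elem[0]:
--                 if i == 'diamond':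
--                     answer += 25
--                 elif i == 'iron':
--                     answer +=5
--                 else:
--                     answer +=1
--         st -= 1
--
--
--     return answer
-- ===== SOURCE B (Python) =====
-- def solution(picks, minerals):
--     d, i, s = picks
--     minerals = minerals[:(d + i + s) * 5]
--     VALUE = {'stone': 1, 'iron': 5}
--     chunks = []
--     freq = {}
--     for j in range(0, len(minerals), 5):
--         c = minerals[j:j + 5]
--         w = sum(VALUE.get(m, 25) for m in c)
--         chunks.append((c, w))
--         freq[w] = freq.get(w, 0) + 1
--     t1 = max(d, 0)
--     t2 = t1 + max(i, 0)
--     t3 = t2 + max(s, 0)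
--     COST_IRON = {'diamond': 5}
--     COST_STONE = {'diamond': 25, 'iron': 5}
--     seen = {}
--     answer = 0
--     for c, w in chunks:
--         pos = sum(n for v, n in freq.items() if v > w) + seen.get(w, 0)
--         seen[w] = seen.get(w, 0) + 1
--         if pos < t1:
--             answer += len(c)
--         elif pos < t2:
--             answer += sum(COST_IRON.get(m, 1) for m in c)
--         elif pos < t3:
--             answer += sum(COST_STONE.get(m, 1) for m in c)
--     return answer
-- ===== Notes on version B (the rewrite author's own statement) =====
-- stated objective: alternative
-- what changed: Replaces A's stable comparison sort of the chunk list plus three destructive while-loops with pop(0) by a sort-free histogram ranking: one pass builds the (chunk, weight) pairs and a weight-frequency dict, then each chunk's stable rank is computed as (# chunks of strictly greater weight, summed from the histogram) + (# earlier equal-weight chunks from a running counter) and its pick tier is read off cumulative thresholds.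
import Mathlib
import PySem

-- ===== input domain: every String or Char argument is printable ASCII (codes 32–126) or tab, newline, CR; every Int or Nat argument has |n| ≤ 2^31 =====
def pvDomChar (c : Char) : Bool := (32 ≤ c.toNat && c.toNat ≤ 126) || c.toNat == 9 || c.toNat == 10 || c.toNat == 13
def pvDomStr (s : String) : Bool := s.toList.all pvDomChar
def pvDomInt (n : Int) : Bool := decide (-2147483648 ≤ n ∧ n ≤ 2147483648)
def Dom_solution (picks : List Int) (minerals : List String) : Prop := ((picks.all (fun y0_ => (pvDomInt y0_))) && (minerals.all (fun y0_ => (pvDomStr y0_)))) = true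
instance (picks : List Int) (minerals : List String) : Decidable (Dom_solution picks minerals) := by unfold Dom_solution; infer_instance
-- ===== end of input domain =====

-- B replaces A's stable comparison sort plus three destructive pop(0) while-loops by a
-- weight-histogram ranking: each chunk's stable rank is (# chunks of strictly greater
-- weight, read from a frequency dict) + (# earlier chunks of equal weight), and its pick
-- tier is read off cumulative thresholds (objective: alternative algorithm, no sort).


-- ===== PORT A =====
def listDiv (lst : List String) (n : Int) : List (List String) :=
  (PySem.List.pyRange 0 lst.length n).map (fun i => PySem.List.slice lst (some i) (some (i + n)))

-- chunk weight: the inner `for j in i` accumulation of A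
def chunkWeightA (c : List String) (sum_ : Int) : Int :=
  c.foldl (fun s j => if j == "stone" then s + 1 else if j == "iron" then s + 5 else s + 25) sum_

-- `while dia > 0: …`
def loopDia (dia : Int) (l : List (List String × Int)) (acc : Int) : Int × List (List String × Int) :=
  if 0 < dia then
    match l with
    | [] => loopDia (dia - 1) [] acc
    | e :: t => loopDia (dia - 1) t (e.1.foldl (fun a _ => a + 1) acc)
  else (acc, l)
termination_by dia.toNat
decreasing_by all_goals omega

-- `while ir > 0: …`
def loopIr (ir : Int) (l : List (List String × Int)) (acc : Int) : Int × List (List String × Int) :=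
  if 0 < ir then
    match l with
    | [] => loopIr (ir - 1) [] acc
    | e :: t => loopIr (ir - 1) t (e.1.foldl (fun a j => if j == "diamond" then a + 5 else a + 1) acc)
  else (acc, l)
termination_by ir.toNat
decreasing_by all_goals omega

-- `while st > 0: …`
def loopSt (st : Int) (l : List (List String × Int)) (acc : Int) : Int × List (List String × Int) :=
  if 0 < st then
    match l with
    | [] => loopSt (st - 1) [] acc
    | e :: t => loopSt (st - 1) t
        (e.1.foldl (fun a j => if j == "diamond" then a + 25 else if j == "iron" then a + 5 else a + 1) acc)
  else (acc, l)
termination_by st.toNat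
decreasing_by all_goals omega

def solution (picks : List Int) (minerals : List String) : Int :=
  let sumGok := picks.sum
  let ms := if (minerals.length : Int) > sumGok * 5
            then PySem.List.slice minerals none (some (sumGok * 5)) else minerals
  let min5 := listDiv ms 5
  let mineList := min5.foldl (fun acc i => acc ++ [(i, chunkWeightA i 0)]) []
  let sortedL := PySem.List.sorted mineList (fun x => -x.2) false
  match picks with
  | [dia, ir, st] =>
    let r1 := loopDia dia sortedL 0
    let r2 := loopIr ir r1.2 r1.1
    (loopSt st r2.2 r2.1).1
  | _ => 0  -- unreachable under Pre_solution (Python raises on unpacking)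

-- ===== PORT B =====
def pvVALUE : PySem.Dict String Int := PySem.Dict.ofList [("stone", 1), ("iron", 5)]
def pvCOST_IRON : PySem.Dict String Int := PySem.Dict.ofList [("diamond", 5)]
def pvCOST_STONE : PySem.Dict String Int := PySem.Dict.ofList [("diamond", 25), ("iron", 5)]

def solution_alt (picks : List Int) (minerals : List String) : Int :=
  match picks with
  | [d, i, s] =>
    let ms := PySem.List.slice minerals none (some ((d + i + s) * 5))
    -- one pass: collect (chunk, weight) pairs and the weight histogram `freq`
    let build := (PySem.List.pyRange 0 ms.length 5).foldl
      (fun (st : List (List String × Int) × PySem.Dict Int Int) j =>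
        let c := PySem.List.slice ms (some j) (some (j + 5))
        let w := (c.map (fun m => pvVALUE.getD m 25)).sum
        (st.1 ++ [(c, w)], st.2.insert w (st.2.getD w 0 + 1)))
      ([], PySem.Dict.empty)
    let t1 := max d 0
    let t2 := t1 + max i 0
    let t3 := t2 + max s 0
    -- second pass: rank each chunk from the histogram and a running `seen` counter
    let fin := build.1.foldl
      (fun (st : PySem.Dict Int Int × Int) cw =>
        let pos := ((build.2.items.filter (fun p => cw.2 < p.1)).map (fun p => p.2)).sum
                   + st.1.getD cw.2 0
        let ans := if pos < t1 then st.2 + (cw.1.length : Int)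
                   else if pos < t2 then st.2 + (cw.1.map (fun m => pvCOST_IRON.getD m 1)).sum
                   else if pos < t3 then st.2 + (cw.1.map (fun m => pvCOST_STONE.getD m 1)).sum
                   else st.2
        (st.1.insert cw.2 (st.1.getD cw.2 0 + 1), ans))
      (PySem.Dict.empty, 0)
    fin.2
  | [] => 0
  | [_] => 0
  | [_, _] => 0
  | _ :: _ :: _ :: _ :: _ => 0

-- ===== PRECONDITION & SPEC =====
-- Python A unpacks `dia, ir, st = picks` and raises ValueError unless picks has exactly 3 elements.
def Pre_solution (picks : List Int) (minerals : List String) : Prop := picks.length = 3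
instance (picks : List Int) (minerals : List String) : Decidable (Pre_solution picks minerals) := by
  unfold Pre_solution; infer_instance

def pvWitness_solution : List Int × List String := ([1, 1, 1], ["diamond", "iron", "stone"])

def Spec_solution (picks : List Int) (minerals : List String) (out : Int) : Prop := out = solution_alt picks minerals
instance (picks : List Int) (minerals : List String) (out : Int) : Decidable (Spec_solution picks minerals out) := by unfold Spec_solution; infer_instance

-- ===== CLAIM (what is proved, stated in full; the proofs are below) =====
def Claim_equal_solution : Prop := ∀ (picks : List Int) (minerals : List String), Dom_solution picks minerals → Pre_solution picks minerals → Spec_solution picks minerals (solution picks minerals)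

-- ===== LEMMAS AND PROOFS =====

-- mineral weight (A's branch order: stone, iron, else 25) and the two tier costs
def wt (m : String) : Int := if m == "stone" then 1 else if m == "iron" then 5 else 25
def wtChunk (c : List String) : Int := (c.map wt).sum
def costIron (c : List String) : Int := (c.map (fun j => if j == "diamond" then (5:Int) else 1)).sum
def costStone (c : List String) : Int := (c.map (fun j => if j == "diamond" then (25:Int) else if j == "iron" then 5 else 1)).sum

-- position-indexed sum over a list
def sumIdx {α : Type} (F : Nat → α → Int) : List α → Int
  | [] => 0
  | c :: t => F 0 c + sumIdx (fun i x => F (i + 1) x) t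

-- stable descending rank of the element at index j (value x) of l
def gtCount {α : Type} (w : α → Int) (l : List α) (x : α) : Nat :=
  l.countP (fun y => decide (w x < w y))
def rankAt {α : Type} (w : α → Int) (l : List α) (j : Nat) (x : α) : Nat :=
  gtCount w l x + (l.take j).countP (fun y => decide (w y = w x))

theorem sumIdx_congr {α : Type} {F G : Nat → α → Int} (h : ∀ i c, F i c = G i c)
    (l : List α) : sumIdx F l = sumIdx G l := by
  have : F = G := funext fun i => funext (h i)
  rw [this]

theorem sumIdx_congr_getElem {α : Type} :
    ∀ (l : List α) (F G : Nat → α → Int),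
    (∀ (j : Nat) (hj : j < l.length), F j l[j] = G j l[j]) → sumIdx F l = sumIdx G l := by
  intro l
  induction l with
  | nil => intro F G _; rfl
  | cons c t ih =>
    intro F G h
    simp only [sumIdx]
    have h0 : F 0 c = G 0 c := by simpa using h 0 (by simp)
    rw [h0, ih (fun i x => F (i + 1) x) (fun i x => G (i + 1) x)
      (fun j hj => by simpa using h (j + 1) (by simpa using Nat.succ_lt_succ hj))]

theorem sumIdx_append {α : Type} :
    ∀ (u v : List α) (F : Nat → α → Int),
    sumIdx F (u ++ v) = sumIdx F u + sumIdx (fun i c => F (i + u.length) c) v := by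
  intro u
  induction u with
  | nil => intro v F; simp [sumIdx]
  | cons x t ih =>
    intro v F
    simp only [List.cons_append, sumIdx, List.length_cons]
    rw [ih v (fun i c => F (i + 1) c)]
    have hcg : sumIdx (fun i c => F (i + t.length + 1) c) v
        = sumIdx (fun i c => F (i + (t.length + 1)) c) v :=
      sumIdx_congr (by intro i c; rw [Nat.add_assoc]) v
    rw [hcg, add_assoc]

theorem sumIdx_zero {α : Type} : ∀ l : List α, sumIdx (fun _ _ => (0:Int)) l = 0 := by
  intro l
  induction l with
  | nil => rfl
  | cons c t ih => simpa [sumIdx] using ih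

theorem sumIdx_ifLt {α : Type} (f : α → Int) :
    ∀ (n : Nat) (F : Nat → α → Int) (l : List α),
    sumIdx (fun i c => if i < n then f c else F i c) l
      = ((l.take n).map f).sum + sumIdx (fun i c => F (i + n) c) (l.drop n) := by
  intro n
  induction n with
  | zero => intro F l; simp
  | succ k ih =>
    intro F l
    cases l with
    | nil => simp [sumIdx]
    | cons c t =>
      simp only [sumIdx, List.take_succ_cons, List.drop_succ_cons, List.map, List.sum_cons]
      have h1 : sumIdx (fun i x => if i + 1 < k + 1 then f x else F (i + 1) x) t
          = sumIdx (fun i x => if i < k then f x else F (i + 1) x) t :=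
        sumIdx_congr (by intro i x; simp [Nat.add_lt_add_iff_right]) t
      rw [h1, ih (fun i x => F (i + 1) x) t]
      have h2 : sumIdx (fun i x => F (i + k + 1) x) (t.drop k)
          = sumIdx (fun i x => F (i + (k + 1)) x) (t.drop k) :=
        sumIdx_congr (by intro i x; rw [Nat.add_assoc]) (t.drop k)
      rw [h2]
      simp only [Nat.zero_lt_succ, if_pos]
      ring

theorem countP_two_le {α : Type} (p q r : α → Bool)
    (hpr : ∀ y, p y = true → r y = true) (hqr : ∀ y, q y = true → r y = true)
    (hdisj : ∀ y, ¬(p y = true ∧ q y = true)) :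
    ∀ l : List α, l.countP p + l.countP q ≤ l.countP r := by
  intro l
  induction l with
  | nil => simp
  | cons x t ih =>
    simp only [List.countP_cons]
    by_cases hp : p x = true <;> by_cases hq : q x = true
    · exact absurd ⟨hp, hq⟩ (hdisj x)
    · have := hpr x hp; simp [hp, hq, this]; omega
    · have := hqr x hq; simp [hp, hq, this]; omega
    · simp [hp, hq]; omega

theorem countP_le_split {α : Type} (w : α → Int) (x : α) :
    ∀ l : List α, l.countP (fun y => decide (w x ≤ w y))
      = l.countP (fun y => decide (w x < w y)) + l.countP (fun y => decide (w y = w x)) := by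
  intro l
  induction l with
  | nil => simp
  | cons y t ih =>
    simp only [List.countP_cons, ih]
    rcases lt_trichotomy (w x) (w y) with h | h | h
    · simp [h, le_of_lt h, h.ne', not_lt.2 (le_of_lt h)]; omega
    · simp [h.le, h.symm, lt_irrefl]; omega
    · simp [not_le.2 h, not_lt.2 h.le, (ne_of_gt h)]; omega

theorem insert_sumIdx {α : Type} (w : α → Int) (x : α) :
    ∀ (L : List α), L.Pairwise (fun a b => w b ≤ w a) → ∀ F : Nat → α → Int,
    sumIdx F (PySem.List.insertBy (fun a b => decide (-(w a) < -(w b))) x L)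
      = F (L.countP (fun y => decide (w x ≤ w y))) x
        + sumIdx (fun i c => if i < L.countP (fun y => decide (w x ≤ w y)) then F i c
                             else F (i + 1) c) L := by
  intro L
  induction L with
  | nil =>
    intro _ F
    simp [PySem.List.insertBy, sumIdx]
  | cons y t ih =>
    intro hpw F
    have hpw' : t.Pairwise (fun a b => w b ≤ w a) := hpw.of_cons
    have hhead : ∀ z ∈ t, w z ≤ w y := fun z hz => List.rel_of_pairwise_cons hpw hz
    by_cases hxy : w y < w x
    · -- x goes in front; no element of y :: t weighs ≥ w x
      have hins : PySem.List.insertBy (fun a b => decide (-(w a) < -(w b))) x (y :: t)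
          = x :: y :: t := by
        simp [PySem.List.insertBy, hxy]
      have hk : (y :: t).countP (fun z => decide (w x ≤ w z)) = 0 := by
        rw [List.countP_eq_zero]
        intro z hz
        rcases List.mem_cons.1 hz with rfl | hz'
        · simpa using not_le.2 hxy
        · simpa using not_le.2 (lt_of_le_of_lt (hhead z hz') hxy)
      rw [hins, hk]
      have h0 : sumIdx (fun i c => if i < 0 then F i c else F (i + 1) c) (y :: t)
          = sumIdx (fun i c => F (i + 1) c) (y :: t) :=
        sumIdx_congr (by intro i c; simp) _
      rw [h0]
      simp [sumIdx]
    · -- w x ≤ w y : x is inserted into the tail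
      have hle : w x ≤ w y := not_lt.1 hxy
      have hins : PySem.List.insertBy (fun a b => decide (-(w a) < -(w b))) x (y :: t)
          = y :: PySem.List.insertBy (fun a b => decide (-(w a) < -(w b))) x t := by
        simp [PySem.List.insertBy, not_lt.1 hxy, not_lt]
      have hk : (y :: t).countP (fun z => decide (w x ≤ w z))
          = t.countP (fun z => decide (w x ≤ w z)) + 1 := by
        simp [List.countP_cons, hle]
      rw [hins, hk]
      simp only [sumIdx]
      rw [ih hpw' (fun i c => F (i + 1) c)]
      have hsum : sumIdx (fun i c =>
            if i < t.countP (fun z => decide (w x ≤ w z)) then F (i + 1) c else F (i + 1 + 1) c) t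
          = sumIdx (fun i c =>
            if i + 1 < t.countP (fun z => decide (w x ≤ w z)) + 1 then F (i + 1) c
            else F (i + 1 + 1) c) t :=
        sumIdx_congr (by intro i c; simp [Nat.add_lt_add_iff_right]) t
      rw [hsum]
      simp only [Nat.succ_pos, if_pos, Nat.zero_lt_succ]
      ring

theorem rankAt_last {α : Type} (w : α → Int) (t : List α) (x : α) :
    rankAt w (t ++ [x]) t.length x = t.countP (fun y => decide (w x ≤ w y)) := by
  unfold rankAt gtCount
  rw [List.countP_append, List.take_left, countP_le_split w x t]
  simp [List.countP_cons]

theorem gtCount_append_one {α : Type} (w : α → Int) (t : List α) (x c : α) :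
    gtCount w (t ++ [x]) c = gtCount w t c + (if w c < w x then 1 else 0) := by
  unfold gtCount
  rw [List.countP_append]
  by_cases h : w c < w x <;> simp [List.countP_cons, h]

theorem rankAt_append_lt {α : Type} (w : α → Int) (t : List α) (x : α) (j : Nat)
    (hj : j < t.length) (h : w t[j] < w x) :
    rankAt w (t ++ [x]) j t[j] = rankAt w t j t[j] + 1
      ∧ t.countP (fun y => decide (w x ≤ w y)) ≤ rankAt w t j t[j] := by
  constructor
  · unfold rankAt
    rw [gtCount_append_one, List.take_append_of_le_length hj.le]
    simp [h]
    omega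
  · have hmono : t.countP (fun y => decide (w x ≤ w y))
        ≤ t.countP (fun y => decide (w t[j] < w y)) :=
      List.countP_mono_left (by intro a _ ha; simp at ha ⊢; omega)
    unfold rankAt gtCount
    omega

theorem rankAt_append_ge {α : Type} (w : α → Int) (t : List α) (x : α) (j : Nat)
    (hj : j < t.length) (h : w x ≤ w t[j]) :
    rankAt w (t ++ [x]) j t[j] = rankAt w t j t[j]
      ∧ rankAt w t j t[j] < t.countP (fun y => decide (w x ≤ w y)) := by
  constructor
  · unfold rankAt
    rw [gtCount_append_one, List.take_append_of_le_length hj.le]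
    have : ¬ (w t[j] < w x) := not_lt.2 h
    simp [this]
  · have hdrop : t.drop j = t[j] :: t.drop (j + 1) := (List.getElem_cons_drop hj).symm
    set c := t[j] with hc
    have hsplit := (List.take_append_drop j t).symm
    have hsp : ∀ p : α → Bool, t.countP p = (t.take j).countP p + (t.drop j).countP p := by
      intro p
      conv_lhs => rw [hsplit]
      exact List.countP_append ..
    have hd : ∀ p : α → Bool,
        (t.drop j).countP p = (if p c then 1 else 0) + (t.drop (j + 1)).countP p := by
      intro p
      rw [hdrop]
      simp [List.countP_cons, Nat.add_comm]
    have e1 := hsp (fun y => decide (w x ≤ w y))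
    have e2 := hd (fun y => decide (w x ≤ w y))
    have e3 := hsp (fun y => decide (w c < w y))
    have e4 := hd (fun y => decide (w c < w y))
    simp only [h, decide_true, if_pos, lt_irrefl, decide_false, if_neg, not_false_iff,
      Bool.false_eq_true] at e2 e4
    have h2 : (t.take j).countP (fun y => decide (w c < w y))
          + (t.take j).countP (fun y => decide (w y = w c))
        ≤ (t.take j).countP (fun y => decide (w x ≤ w y)) :=
      countP_two_le _ _ _
        (by intro y hy; simp at hy ⊢; omega)
        (by intro y hy; simp at hy ⊢; omega)
        (by intro y ⟨hy1, hy2⟩; simp at hy1 hy2; omega)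
        (t.take j)
    have h3 : (t.drop (j + 1)).countP (fun y => decide (w c < w y))
        ≤ (t.drop (j + 1)).countP (fun y => decide (w x ≤ w y)) :=
      List.countP_mono_left (by intro a _ ha; simp at ha ⊢; omega)
    unfold rankAt gtCount
    omega

theorem main_rank {α : Type} (w : α → Int) :
    ∀ (l : List α) (F : Nat → α → Int),
    sumIdx F (PySem.List.sorted l (fun a => -(w a)) false)
      = sumIdx (fun j c => F (rankAt w l j c) c) l := by
  intro l
  induction l using List.reverseRecOn with
  | nil =>
    intro F
    rw [PySem.List.sorted_eq_foldl_insertBy]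
    simp [sumIdx]
  | append_singleton t x ih =>
    intro F
    have hins : PySem.List.sorted (t ++ [x]) (fun a => -(w a)) false
        = PySem.List.insertBy (fun a b => decide (-(w a) < -(w b))) x
            (PySem.List.sorted t (fun a => -(w a)) false) := by
      rw [PySem.List.sorted_eq_foldl_insertBy, PySem.List.sorted_eq_foldl_insertBy,
        List.foldl_append]
      rfl
    have hpw : (PySem.List.sorted t (fun a => -(w a)) false).Pairwise
        (fun a b => w b ≤ w a) := by
      refine (PySem.List.sorted_pairwise t (fun a => -(w a))).imp ?_
      intro a b hab
      omega
    rw [hins, insert_sumIdx w x _ hpw F]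
    have hkt : (PySem.List.sorted t (fun a => -(w a)) false).countP
          (fun y => decide (w x ≤ w y)) = t.countP (fun y => decide (w x ≤ w y)) :=
      (PySem.List.sorted_perm t (fun a => -(w a)) false).countP_eq _
    rw [hkt, ih]
    rw [sumIdx_append]
    have hsingle : sumIdx (fun i c => F (rankAt w (t ++ [x]) (i + t.length) c) c) [x]
        = F (rankAt w (t ++ [x]) t.length x) x := by
      simp [sumIdx]
    rw [hsingle, rankAt_last]
    have hmain : sumIdx (fun j c =>
          if rankAt w t j c < t.countP (fun y => decide (w x ≤ w y))
          then F (rankAt w t j c) c else F (rankAt w t j c + 1) c) t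
        = sumIdx (fun j c => F (rankAt w (t ++ [x]) j c) c) t := by
      apply sumIdx_congr_getElem
      intro j hj
      by_cases hcx : w t[j] < w x
      · obtain ⟨he, hge⟩ := rankAt_append_lt w t x j hj hcx
        rw [he, if_neg (by omega)]
      · obtain ⟨he, hlt⟩ := rankAt_append_ge w t x j hj (not_lt.1 hcx)
        rw [he, if_pos hlt]
    rw [hmain]
    ring

-- ---- A-side lemmas: the three while-loops are phase sums over take/drop ----

theorem foldl_step_eq (g : String → Int) (step : Int → String → Int)
    (h : ∀ a j, step a j = a + g j) :
    ∀ (c : List String) (a : Int), c.foldl step a = a + (c.map g).sum := by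
  intro c
  induction c with
  | nil => intro a; simp
  | cons x t ih => intro a; simp [h, ih, add_assoc]

theorem chunkWeightA_eq (c : List String) : chunkWeightA c 0 = wtChunk c := by
  have h := foldl_step_eq wt
      (fun s j => if j == "stone" then s + 1 else if j == "iron" then s + 5 else s + 25)
      (by intro a j; unfold wt; by_cases h1 : j == "stone" <;> by_cases h2 : j == "iron" <;> simp_all) c 0
  simpa [chunkWeightA, wtChunk] using h

theorem loopDia_eq : ∀ (n : Nat) (dia : Int), dia.toNat = n →
    ∀ (l : List (List String × Int)) (acc : Int),
    loopDia dia l acc = (acc + ((l.take n).map (fun e => (e.1.length : Int))).sum, l.drop n) := by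
  intro n
  induction n with
  | zero =>
    intro dia h l acc
    unfold loopDia
    have : ¬ 0 < dia := by omega
    simp [this]
  | succ k ih =>
    intro dia h l acc
    unfold loopDia
    have hpos : 0 < dia := by omega
    have hk : (dia - 1).toNat = k := by omega
    cases l with
    | nil =>
      simp only [hpos, if_pos]
      simpa using ih (dia - 1) hk [] acc
    | cons e t =>
      simp only [hpos, if_pos]
      rw [ih (dia - 1) hk t _]
      have := foldl_step_eq (fun _ => (1 : Int)) (fun a _ => a + 1) (by intro a j; rfl) e.1 acc
      simp only [this]
      simp [add_assoc]

theorem loopIr_eq : ∀ (n : Nat) (ir : Int), ir.toNat = n →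
    ∀ (l : List (List String × Int)) (acc : Int),
    loopIr ir l acc = (acc + ((l.take n).map (fun e => costIron e.1)).sum, l.drop n) := by
  intro n
  induction n with
  | zero =>
    intro ir h l acc
    unfold loopIr
    have : ¬ 0 < ir := by omega
    simp [this]
  | succ k ih =>
    intro ir h l acc
    unfold loopIr
    have hpos : 0 < ir := by omega
    have hk : (ir - 1).toNat = k := by omega
    cases l with
    | nil =>
      simp only [hpos, if_pos]
      simpa using ih (ir - 1) hk [] acc
    | cons e t =>
      simp only [hpos, if_pos]
      rw [ih (ir - 1) hk t _]
      have := foldl_step_eq (fun j => if j == "diamond" then (5 : Int) else 1)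
        (fun a j => if j == "diamond" then a + 5 else a + 1)
        (by intro a j; by_cases hj : j == "diamond" <;> simp [hj]) e.1 acc
      simp only [this]
      simp [costIron, add_assoc]

theorem loopSt_eq : ∀ (n : Nat) (st : Int), st.toNat = n →
    ∀ (l : List (List String × Int)) (acc : Int),
    loopSt st l acc = (acc + ((l.take n).map (fun e => costStone e.1)).sum, l.drop n) := by
  intro n
  induction n with
  | zero =>
    intro st h l acc
    unfold loopSt
    have : ¬ 0 < st := by omega
    simp [this]
  | succ k ih =>
    intro st h l acc
    unfold loopSt
    have hpos : 0 < st := by omega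
    have hk : (st - 1).toNat = k := by omega
    cases l with
    | nil =>
      simp only [hpos, if_pos]
      simpa using ih (st - 1) hk [] acc
    | cons e t =>
      simp only [hpos, if_pos]
      rw [ih (st - 1) hk t _]
      have := foldl_step_eq (fun j => if j == "diamond" then (25 : Int) else if j == "iron" then 5 else 1)
        (fun a j => if j == "diamond" then a + 25 else if j == "iron" then a + 5 else a + 1)
        (by intro a j; by_cases h1 : j == "diamond" <;> by_cases h2 : j == "iron" <;> simp_all) e.1 acc
      simp only [this]
      simp [costStone, add_assoc]

-- A applies the slice only when the list is longer; the unconditional slice is the same list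
theorem ms_eq (minerals : List String) (k : Int) :
    (if (minerals.length : Int) > k then PySem.List.slice minerals none (some k) else minerals)
      = PySem.List.slice minerals none (some k) := by
  split_ifs with h
  · rfl
  · have h0 : 0 ≤ k := by omega
    rw [PySem.List.slice_to minerals h0]
    exact (List.take_of_length_le (by omega)).symm

-- ---- B-side lemmas: the literal dicts, the build pass and the ranking pass ----

theorem pvVALUE_getD (m : String) : pvVALUE.getD m 25 = wt m := by
  have h : pvVALUE = PySem.Dict.mk [("stone", (1:Int)), ("iron", 5)] := by rfl
  rw [h, PySem.Dict.getD_eq_get?_getD]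
  unfold wt
  by_cases h1 : m = "stone"
  · subst h1; simp [PySem.Dict.get?_mk_cons]
  · by_cases h2 : m = "iron"
    · subst h2; simp [PySem.Dict.get?_mk_cons]
    · simp [PySem.Dict.get?_mk_cons, beq_iff_eq, h1, h2,
        show ¬ "stone" = m from fun hh => h1 hh.symm,
        show ¬ "iron" = m from fun hh => h2 hh.symm, PySem.Dict.get?]

theorem pvCOST_IRON_getD (m : String) :
    pvCOST_IRON.getD m 1 = (if m == "diamond" then (5:Int) else 1) := by
  have h : pvCOST_IRON = PySem.Dict.mk [("diamond", (5:Int))] := by rfl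
  rw [h, PySem.Dict.getD_eq_get?_getD]
  by_cases h1 : m = "diamond"
  · subst h1; simp [PySem.Dict.get?_mk_cons]
  · simp [PySem.Dict.get?_mk_cons, beq_iff_eq, h1,
      show ¬ "diamond" = m from fun hh => h1 hh.symm, PySem.Dict.get?]

theorem pvCOST_STONE_getD (m : String) :
    pvCOST_STONE.getD m 1 = (if m == "diamond" then (25:Int) else if m == "iron" then 5 else 1) := by
  have h : pvCOST_STONE = PySem.Dict.mk [("diamond", (25:Int)), ("iron", 5)] := by rfl
  rw [h, PySem.Dict.getD_eq_get?_getD]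
  by_cases h1 : m = "diamond"
  · subst h1; simp [PySem.Dict.get?_mk_cons]
  · by_cases h2 : m = "iron"
    · subst h2; simp [PySem.Dict.get?_mk_cons]
    · simp [PySem.Dict.get?_mk_cons, beq_iff_eq, h1, h2,
        show ¬ "diamond" = m from fun hh => h1 hh.symm,
        show ¬ "iron" = m from fun hh => h2 hh.symm, PySem.Dict.get?]

-- the build pass: collect the mapped pairs and count the weights
theorem foldl_build {β : Type} (g : Int → β) (h : Int → Int) :
    ∀ (l : List Int) (acc : List β) (dd : PySem.Dict Int Int),
    l.foldl (fun st j => (st.1 ++ [g j], st.2.insert (h j) (st.2.getD (h j) 0 + 1))) (acc, dd)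
      = (acc ++ l.map g, (l.map h).foldl (fun d x => d.insert x (d.getD x 0 + 1)) dd) := by
  intro l
  induction l with
  | nil => intro acc dd; simp
  | cons j t ih => intro acc dd; simp [ih]

theorem sum_map_beq_one {x : Int} :
    ∀ (D : List Int), D.Nodup →
    (D.map (fun k => if x == k then (1:Int) else 0)).sum = if x ∈ D then 1 else 0 := by
  intro D
  induction D with
  | nil => simp
  | cons k t ih =>
    intro hnd
    simp only [List.map, List.sum_cons]
    rw [ih hnd.of_cons]
    by_cases hxk : x = k
    · subst hxk
      have : x ∉ t := (List.nodup_cons.1 hnd).1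
      simp [this]
    · simp [hxk, beq_iff_eq]

theorem sum_counts_eq_countP (p : Int → Bool) :
    ∀ (xs D : List Int), D.Nodup → (∀ v ∈ D, p v = true) → (∀ v ∈ xs, p v = true → v ∈ D) →
    (D.map (fun k => (xs.count k : Int))).sum = (xs.countP p : Int) := by
  intro xs
  induction xs with
  | nil => intro D _ _ _; simp
  | cons x t ih =>
    intro D hnd hDp hxD
    have hstep : (D.map (fun k => ((x :: t).count k : Int))).sum
        = (D.map (fun k => (t.count k : Int))).sum
          + (D.map (fun k => if x == k then (1:Int) else 0)).sum := by
      rw [← PySem.List.sum_map_add_int]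
      congr 1
      apply List.map_congr_left
      intro k _
      rw [List.count_cons]
      by_cases hxk : x = k
      · subst hxk
        simp
      · simp [beq_iff_eq, hxk, show ¬ k = x from fun hh => hxk hh.symm]
    rw [hstep, ih D hnd hDp (fun v hv hp => hxD v (List.mem_cons_of_mem x hv) hp),
      sum_map_beq_one D hnd]
    rw [List.countP_cons]
    by_cases hp : p x = true
    · have hmem : x ∈ D := hxD x List.mem_cons_self hp
      simp only [hmem, if_pos, hp]
      push_cast
      ring
    · have hx : x ∉ D := fun hmem => hp (hDp x hmem)
      simp [hx, hp]

-- the filtered-items sum over the weight histogram is a countP over the weights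
theorem histo_sum (xs : List Int) (v : Int) :
    (((PySem.Dict.counter xs).items.filter (fun p => v < p.1)).map (fun p => p.2)).sum
      = (xs.countP (fun y => decide (v < y)) : Int) := by
  rw [PySem.Dict.items_counter]
  rw [List.filter_map]
  rw [List.map_map]
  have hD : ((PySem.Set.ofList xs : List Int).filter
      (fun k => decide (v < k))).Nodup := (PySem.Set.nodup_ofList xs).filter _
  have := sum_counts_eq_countP (fun y => decide (v < y)) xs
    ((PySem.Set.ofList xs : List Int).filter (fun k => decide (v < k))) hD
    (by intro y hy; exact (List.mem_filter.1 hy).2)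
    (by intro y hy hp
        exact List.mem_filter.2 ⟨(PySem.Set.mem_ofList xs y).2 hy, hp⟩)
  rw [← this]
  congr 1

-- the ranking pass with a running `seen` counter, relative to an already-processed prefix
theorem loopB {β : Type} (G : Int → Int) (payload : Int → β → Int) :
    ∀ (rest : List (β × Int)) (pre : List Int) (acc : Int),
    rest.foldl (fun (st : PySem.Dict Int Int × Int) cw =>
        (st.1.insert cw.2 (st.1.getD cw.2 0 + 1),
         st.2 + payload (G cw.2 + st.1.getD cw.2 0) cw.1))
      (pre.foldl (fun d x => d.insert x (d.getD x 0 + 1)) PySem.Dict.empty, acc)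
    = (((pre ++ rest.map (fun cw => cw.2)).foldl
          (fun d x => d.insert x (d.getD x 0 + 1)) PySem.Dict.empty),
       acc + sumIdx (fun j cw =>
         payload (G cw.2 + ((pre ++ ((rest.map (fun cw => cw.2)).take j)).count cw.2 : Int)) cw.1)
         rest) := by
  intro rest
  induction rest with
  | nil => intro pre acc; simp [sumIdx]
  | cons cw rs ih =>
    intro pre acc
    simp only [List.foldl_cons]
    have hget : (pre.foldl (fun d x => d.insert x (d.getD x 0 + 1)) PySem.Dict.empty).getD cw.2 0
        = (pre.count cw.2 : Int) := by
      rw [PySem.Dict.getD_foldl_insert_add_one]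
      simp [PySem.Dict.getD_empty]
    have hdict : (pre.foldl (fun d x => d.insert x (d.getD x 0 + 1)) PySem.Dict.empty).insert cw.2
          ((pre.count cw.2 : Int) + 1)
        = (pre ++ [cw.2]).foldl (fun d x => d.insert x (d.getD x 0 + 1)) PySem.Dict.empty := by
      rw [List.foldl_append]
      simp only [List.foldl_cons, List.foldl_nil, hget]
    rw [hget, hdict, ih (pre ++ [cw.2]) (acc + payload (G cw.2 + (pre.count cw.2 : Int)) cw.1)]
    simp only [Prod.mk.injEq]
    constructor
    · rw [List.append_assoc]
      rfl
    · simp only [sumIdx, List.take_zero, List.append_nil, List.map]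
      rw [add_assoc]
      congr 1
      congr 1
      apply sumIdx_congr
      intro i c
      rw [List.take_succ_cons, List.append_assoc]
      rfl

theorem wtChunk_def (c : List String) : wtChunk c = (c.map wt).sum := rfl
theorem costIron_def (c : List String) :
    costIron c = (c.map (fun m => if m == "diamond" then (5:Int) else 1)).sum := rfl
theorem costStone_def (c : List String) :
    costStone c = (c.map (fun m => if m == "diamond" then (25:Int) else if m == "iron" then 5 else 1)).sum := rfl

-- the Int-threshold tier test of B is the Nat-threshold tier test of the phase decomposition
theorem payload_eq (d i s : Int) (n : Nat) (c : List String) :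
    (if (n:Int) < max d 0 then (c.length : Int)
     else if (n:Int) < max d 0 + max i 0 then costIron c
     else if (n:Int) < max d 0 + max i 0 + max s 0 then costStone c else 0)
    = (if n < d.toNat then (c.length:Int)
       else if n < d.toNat + i.toNat then costIron c
       else if n < d.toNat + i.toNat + s.toNat then costStone c else 0) := by
  have h1 : ((n:Int) < max d 0) ↔ n < d.toNat := by omega
  have h2 : ((n:Int) < max d 0 + max i 0) ↔ n < d.toNat + i.toNat := by omega
  have h3 : ((n:Int) < max d 0 + max i 0 + max s 0) ↔ n < d.toNat + i.toNat + s.toNat := by omega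
  rw [if_congr h1 rfl (if_congr h2 rfl (if_congr h3 rfl rfl))]

-- ===== VERDICT (by name: the statement is the Claim_ definition above) =====
theorem solution_spec : Claim_equal_solution := by
  intro picks minerals _hdom hpre
  unfold Spec_solution
  match picks, hpre with
  | [d, i, s], _ =>
    unfold solution solution_alt
    simp only []
    have hsum : ([d, i, s] : List Int).sum = d + i + s := by simp; ring
    rw [hsum, ms_eq]
    set ms := PySem.List.slice minerals none (some ((d + i + s) * 5)) with hms
    set a := d.toNat with ha
    set b := i.toNat with hb
    set cc := s.toNat with hcc
    -- the phase cost function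
    set F := (fun (n : Nat) (cw : List String × Int) =>
      if n < a then (cw.1.length : Int)
      else if n < a + b then costIron cw.1
      else if n < a + b + cc then costStone cw.1 else 0) with hF
    -- canonical chunk pairs
    set pairs := (PySem.List.pyRange 0 ms.length 5).map
      (fun j => (PySem.List.slice ms (some j) (some (j + 5)),
                 wtChunk (PySem.List.slice ms (some j) (some (j + 5))))) with hpairs
    -- ---------------- A side ----------------
    have hmine : (listDiv ms 5).foldl (fun acc c => acc ++ [(c, chunkWeightA c 0)]) [] = pairs := by
      rw [PySem.List.foldl_append_singleton_eq_map (fun c => (c, chunkWeightA c 0)) (listDiv ms 5) []]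
      rw [hpairs]
      unfold listDiv
      rw [List.map_map]
      simp only [List.nil_append, Function.comp_def, chunkWeightA_eq]
    rw [hmine]
    set S := PySem.List.sorted pairs (fun x => -x.2) false with hS
    rw [loopDia_eq a d rfl S 0]
    rw [loopIr_eq b i rfl (S.drop a)]
    rw [loopSt_eq cc s rfl ((S.drop a).drop b)]
    simp only [zero_add]
    -- assemble the three phase sums into sumIdx F S
    have hphase : sumIdx F S
        = ((S.take a).map (fun e => (e.1.length : Int))).sum
          + (((S.drop a).take b).map (fun e => costIron e.1)).sum
          + ((((S.drop a).drop b).take cc).map (fun e => costStone e.1)).sum := by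
      rw [hF]
      rw [sumIdx_ifLt (fun cw => (cw.1.length : Int)) a
        (fun n cw => if n < a + b then costIron cw.1 else if n < a + b + cc then costStone cw.1 else 0) S]
      have hc1 : sumIdx (fun n cw => if n + a < a + b then costIron cw.1
            else if n + a < a + b + cc then costStone cw.1 else 0) (S.drop a)
          = sumIdx (fun n cw => if n < b then costIron cw.1
            else if n < b + cc then costStone cw.1 else 0) (S.drop a) := by
        apply sumIdx_congr
        intro n cw
        have e1 : (n + a < a + b) ↔ (n < b) := by omega
        have e2 : (n + a < a + b + cc) ↔ (n < b + cc) := by omega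
        rw [if_congr e1 rfl (if_congr e2 rfl rfl)]
      rw [hc1]
      rw [sumIdx_ifLt (fun cw => costIron cw.1) b
        (fun n cw => if n < b + cc then costStone cw.1 else 0) (S.drop a)]
      have hc2 : sumIdx (fun n cw => if n + b < b + cc then costStone cw.1 else 0) ((S.drop a).drop b)
          = sumIdx (fun n cw => if n < cc then costStone cw.1 else 0) ((S.drop a).drop b) := by
        apply sumIdx_congr
        intro n cw
        have e3 : (n + b < b + cc) ↔ (n < cc) := by omega
        rw [if_congr e3 rfl rfl]
      rw [hc2]
      rw [sumIdx_ifLt (fun cw => costStone cw.1) cc (fun _ _ => 0) ((S.drop a).drop b)]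
      rw [sumIdx_zero]
      ring
    rw [← hphase]
    -- the stable-rank theorem, with the weight = second component
    have hrank := main_rank (fun cw : List String × Int => cw.2) pairs F
    rw [hS, hrank]
    -- ---------------- B side ----------------
    have hval : (fun m => pvVALUE.getD m 25) = wt := funext pvVALUE_getD
    simp only [hval, ← wtChunk_def]
    rw [foldl_build
      (fun j => (PySem.List.slice ms (some j) (some (j + 5)),
                 wtChunk (PySem.List.slice ms (some j) (some (j + 5)))))
      (fun j => wtChunk (PySem.List.slice ms (some j) (some (j + 5))))
      (PySem.List.pyRange 0 ms.length 5) [] PySem.Dict.empty]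
    simp only [List.nil_append, ← hpairs]
    set weights := (PySem.List.pyRange 0 ms.length 5).map
      (fun j => wtChunk (PySem.List.slice ms (some j) (some (j + 5)))) with hweights
    rw [PySem.Dict.foldl_insert_getD_add_one_eq_counter]
    -- rewrite the ranking fold into loopB's shape
    have hbody : (fun (st : PySem.Dict Int Int × Int) (cw : List String × Int) =>
          (st.1.insert cw.2 (st.1.getD cw.2 0 + 1),
           if ((((PySem.Dict.counter weights).items.filter (fun p => cw.2 < p.1)).map
                  (fun p => p.2)).sum + st.1.getD cw.2 0) < max d 0
           then st.2 + (cw.1.length : Int)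
           else if ((((PySem.Dict.counter weights).items.filter (fun p => cw.2 < p.1)).map
                  (fun p => p.2)).sum + st.1.getD cw.2 0) < max d 0 + max i 0
           then st.2 + (cw.1.map (fun m => pvCOST_IRON.getD m 1)).sum
           else if ((((PySem.Dict.counter weights).items.filter (fun p => cw.2 < p.1)).map
                  (fun p => p.2)).sum + st.1.getD cw.2 0) < max d 0 + max i 0 + max s 0
           then st.2 + (cw.1.map (fun m => pvCOST_STONE.getD m 1)).sum
           else st.2))
        = (fun (st : PySem.Dict Int Int × Int) (cw : List String × Int) =>
          (st.1.insert cw.2 (st.1.getD cw.2 0 + 1),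
           st.2 + (fun (pos : Int) (c : List String) =>
             if pos < max d 0 then (c.length : Int)
             else if pos < max d 0 + max i 0 then costIron c
             else if pos < max d 0 + max i 0 + max s 0 then costStone c else 0)
             ((fun v => (weights.countP (fun y => decide (v < y)) : Int)) cw.2 + st.1.getD cw.2 0)
             cw.1)) := by
      funext st cw
      rw [histo_sum weights cw.2]
      have hi : (fun m => pvCOST_IRON.getD m 1)
          = (fun m => if m == "diamond" then (5:Int) else 1) := funext pvCOST_IRON_getD
      have hst : (fun m => pvCOST_STONE.getD m 1)
          = (fun m => if m == "diamond" then (25:Int) else if m == "iron" then 5 else 1) :=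
        funext pvCOST_STONE_getD
      simp only [hi, hst, ← costIron_def, ← costStone_def]
      split_ifs <;> simp
    rw [hbody]
    have hl := loopB (fun v => (weights.countP (fun y => decide (v < y)) : Int))
      (fun (pos : Int) (c : List String) =>
        if pos < max d 0 then (c.length : Int)
        else if pos < max d 0 + max i 0 then costIron c
        else if pos < max d 0 + max i 0 + max s 0 then costStone c else 0)
      pairs [] 0
    simp only [List.foldl_nil, List.nil_append, zero_add] at hl
    rw [hl]
    -- the two indexed sums agree pointwise
    apply sumIdx_congr
    intro j cw
    have hwp : weights = pairs.map (fun cw => cw.2) := by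
      rw [hweights, hpairs, List.map_map]
      rfl
    rw [hwp]
    have h1 : (pairs.map (fun cw : List String × Int => cw.2)).countP (fun y => decide (cw.2 < y))
        = pairs.countP (fun y => decide (cw.2 < y.2)) := by
      rw [List.countP_map]
      rfl
    have h2 : ((pairs.map (fun cw : List String × Int => cw.2)).take j).count cw.2
        = (pairs.take j).countP (fun y => decide (y.2 = cw.2)) := by
      rw [← List.map_take, List.count_eq_countP, List.countP_map]
      rfl
    have hpos : ((((pairs.map (fun cw : List String × Int => cw.2)).countP (fun y => decide (cw.2 < y)) : Nat) : Int)
          + ((((pairs.map (fun cw : List String × Int => cw.2)).take j).count cw.2 : Nat) : Int))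
        = ((rankAt (fun cw : List String × Int => cw.2) pairs j cw : Nat) : Int) := by
      unfold rankAt gtCount
      rw [h1, h2]
      push_cast
      ring
    simp only [hpos]
    rw [payload_eq d i s (rankAt (fun cw : List String × Int => cw.2) pairs j cw) cw.1]
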